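-- pv_equiv track=rewrite | github.com/irahrosete/bigbookpython | bagels.py | get_clues
-- ===== SOURCE A (Python) =====
-- def get_clues(guess, secret_num):
--     """returns a string with the pico, fermi, bagels clues for a guess
--     and secret number pair."""
--     if guess == secret_num:
--         return "You got it!"
--
--     clues = []
--
--     for i in range(len(guess)):
--         if guess[i] == secret_num[i]:
--             clues.append("Fermi")
--         elif guess[i] in secret_num:
--             clues.append("Pico")
--
--     if len(clues) == 0:
--         return "Bagels"
--     else:
--         clues.sort()
--         return " ".join(clues)
-- ===== SOURCE B (Python) =====
-- def get_clues(guess, secret_num):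
--     """returns a string with the pico, fermi, bagels clues for a guess
--     and secret number pair."""
--     if guess == secret_num:
--         return "You got it!"
--
--     fermi = sum(g == s for g, s in zip(guess, secret_num))
--     pico = sum(g != s and g in secret_num for g, s in zip(guess, secret_num))
--
--     if fermi + pico == 0:
--         return "Bagels"
--     return " ".join(["Fermi"] * fermi + ["Pico"] * pico)
-- ===== Notes on version B (the rewrite author's own statement) =====
-- stated objective: simpler
-- what changed: Replaces the clue-list building loop plus sort with two zip-based counts and builds the already-sorted output directly from the counts (all Fermis before all Picos).
import Mathlib
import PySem

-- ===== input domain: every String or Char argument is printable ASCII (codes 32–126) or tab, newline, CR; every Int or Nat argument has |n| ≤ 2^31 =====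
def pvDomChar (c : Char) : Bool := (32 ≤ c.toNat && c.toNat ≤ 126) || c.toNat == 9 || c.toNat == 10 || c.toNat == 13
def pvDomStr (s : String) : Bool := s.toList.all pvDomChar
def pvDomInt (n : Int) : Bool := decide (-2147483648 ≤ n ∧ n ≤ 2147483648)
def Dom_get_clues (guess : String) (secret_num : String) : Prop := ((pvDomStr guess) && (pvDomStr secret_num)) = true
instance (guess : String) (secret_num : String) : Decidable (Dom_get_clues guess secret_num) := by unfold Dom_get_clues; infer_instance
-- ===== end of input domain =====

-- B replaces the clue-list-plus-sort with two zip-based counts and builds the sorted output directly (objective: simpler).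

-- ===== PORT A =====
-- 'guess[i] in secret_num' for the single character guess[i] is exactly char membership in secret_num's characters.
def get_clues (guess : String) (secret_num : String) : String :=
  let g := guess.toList
  let s := secret_num.toList
  if g = s then "You got it!"
  else
    let clues := (PySem.List.pyRange 0 (g.length : Int) 1).foldl
      (fun acc i =>
        if PySem.List.pyGetD g i ' ' = PySem.List.pyGetD s i ' ' then acc ++ ["Fermi"]
        else if PySem.List.pyGetD g i ' ' ∈ s then acc ++ ["Pico"]
        else acc) []
    if clues.length = 0 then "Bagels"
    else PySem.Str.join " " (PySem.List.sorted clues (fun x => x) false)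

-- ===== PORT B =====
def get_clues_alt (guess : String) (secret_num : String) : String :=
  let g := guess.toList
  let s := secret_num.toList
  if g = s then "You got it!"
  else
    let pairs := g.zip s
    let fermi := pairs.countP (fun p => p.1 == p.2)
    let pico := pairs.countP (fun p => !(p.1 == p.2) && decide (p.1 ∈ s))
    if fermi + pico = 0 then "Bagels"
    else PySem.Str.join " " (List.replicate fermi "Fermi" ++ List.replicate pico "Pico")

-- ===== PRECONDITION & SPEC =====
-- A raises IndexError (secret_num[i]) when guess is longer than secret_num; exactly those inputs are excluded.
def Pre_get_clues (guess : String) (secret_num : String) : Prop :=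
  guess.toList.length ≤ secret_num.toList.length
instance (guess : String) (secret_num : String) : Decidable (Pre_get_clues guess secret_num) := by
  unfold Pre_get_clues; infer_instance
def pvWitness_get_clues : String × String := ("12", "21")

def Spec_get_clues (guess : String) (secret_num : String) (out : String) : Prop := out = get_clues_alt guess secret_num
instance (guess : String) (secret_num : String) (out : String) : Decidable (Spec_get_clues guess secret_num out) := by unfold Spec_get_clues; infer_instance

-- ===== CLAIM (what is proved, stated in full; the proofs are below) =====
def Claim_equal_get_clues : Prop := ∀ (guess : String) (secret_num : String), Dom_get_clues guess secret_num → Pre_get_clues guess secret_num → Spec_get_clues guess secret_num (get_clues guess secret_num)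

-- ===== LEMMAS AND PROOFS =====

-- the tokens A's loop body emits for one (guess char, secret char) pair
def pvTok (s : List Char) (p : Char × Char) : List String :=
  if p.1 = p.2 then ["Fermi"] else if p.1 ∈ s then ["Pico"] else []

lemma pvFoldl_range_zip {β : Type} (F : β → Char → Char → β) (d : Char) :
    ∀ (g s : List Char) (init : β), g.length ≤ s.length →
    (List.range g.length).foldl (fun acc k => F acc (g.getD k d) (s.getD k d)) init
      = (g.zip s).foldl (fun acc p => F acc p.1 p.2) init := by
  intro g
  induction g with
  | nil => simp
  | cons a g ih =>
    intro s init h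
    cases s with
    | nil => simp at h
    | cons b s =>
      simp only [List.length_cons, List.range_succ_eq_map, List.foldl_cons, List.foldl_map,
        List.getD_cons_zero, List.getD_cons_succ, List.zip_cons_cons]
      exact ih s (F init a b) (by simpa using h)

lemma pvMem_tok (s : List Char) : ∀ (ps : List (Char × Char)) (x : String),
    x ∈ ps.flatMap (pvTok s) → x = "Fermi" ∨ x = "Pico" := by
  intro ps x hx
  rcases List.mem_flatMap.mp hx with ⟨p, _, hp⟩
  unfold pvTok at hp
  split_ifs at hp <;> simp_all

lemma pvCount_fermi (s : List Char) : ∀ ps : List (Char × Char),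
    (ps.flatMap (pvTok s)).count "Fermi" = ps.countP (fun p => p.1 == p.2) := by
  intro ps
  induction ps with
  | nil => simp
  | cons p ps ih =>
    by_cases h1 : p.1 = p.2
    · simp [pvTok, h1, List.countP_cons, ih, List.count_append]
    · by_cases h2 : p.1 ∈ s
      · simp [pvTok, h1, h2, List.countP_cons, ih, List.count_append]
      · simp [pvTok, h1, h2, List.countP_cons, ih, List.count_append]

lemma pvCount_pico (s : List Char) : ∀ ps : List (Char × Char),
    (ps.flatMap (pvTok s)).count "Pico" = ps.countP (fun p => !(p.1 == p.2) && decide (p.1 ∈ s)) := by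
  intro ps
  induction ps with
  | nil => simp
  | cons p ps ih =>
    by_cases h1 : p.1 = p.2
    · simp [pvTok, h1, List.countP_cons, ih, List.count_append]
    · by_cases h2 : p.1 ∈ s
      · simp [pvTok, h1, h2, List.countP_cons, ih, List.count_append]
      · simp [pvTok, h1, h2, List.countP_cons, ih, List.count_append]

lemma pvLen_tok (s : List Char) : ∀ ps : List (Char × Char),
    (ps.flatMap (pvTok s)).length
      = ps.countP (fun p => p.1 == p.2) + ps.countP (fun p => !(p.1 == p.2) && decide (p.1 ∈ s)) := by
  intro ps
  induction ps with
  | nil => simp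
  | cons p ps ih =>
    by_cases h1 : p.1 = p.2
    · simp [pvTok, h1, List.countP_cons, ih]
      omega
    · by_cases h2 : p.1 ∈ s
      · simp [pvTok, h1, h2, List.countP_cons, ih]
        omega
      · simp [pvTok, h1, h2, List.countP_cons, ih]

lemma pvPerm_replicate (L : List String)
    (hmem : ∀ x ∈ L, x = "Fermi" ∨ x = "Pico") :
    L.Perm (List.replicate (L.count "Fermi") "Fermi" ++ List.replicate (L.count "Pico") "Pico") := by
  apply List.perm_iff_count.mpr
  intro a
  by_cases hF : a = "Fermi"
  · subst hF; simp [List.count_append, List.count_replicate]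
  · by_cases hP : a = "Pico"
    · subst hP; simp [List.count_append, List.count_replicate]
    · have h0 : L.count a = 0 := by
        apply List.count_eq_zero.mpr
        intro hmemA
        rcases hmem a hmemA with h | h <;> simp_all
      have h1 : ¬("Fermi" = a) := fun h => hF h.symm
      have h2 : ¬("Pico" = a) := fun h => hP h.symm
      simp [h0, List.count_append, List.count_replicate, h1, h2]

lemma pvSorted_eq (L : List String)
    (hmem : ∀ x ∈ L, x = "Fermi" ∨ x = "Pico") :
    PySem.List.sorted L (fun x => x) false
      = List.replicate (L.count "Fermi") "Fermi" ++ List.replicate (L.count "Pico") "Pico" := by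
  apply PySem.List.sorted_id_eq_of_perm_of_pairwise
  · exact (pvPerm_replicate L hmem).symm
  · rw [List.pairwise_append]
    refine ⟨?_, ?_, ?_⟩
    · exact List.pairwise_replicate.mpr (Or.inr le_rfl)
    · exact List.pairwise_replicate.mpr (Or.inr le_rfl)
    · intro x hx y hy
      rw [List.eq_of_mem_replicate hx, List.eq_of_mem_replicate hy,
        String.le_iff_toList_le]
      decide

-- A's clue list equals the flatMap of per-pair tokens over the zipped strings.
lemma pvClues_eq (g s : List Char) (h : g.length ≤ s.length) :
    (PySem.List.pyRange 0 (g.length : Int) 1).foldl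
      (fun acc i =>
        if PySem.List.pyGetD g i ' ' = PySem.List.pyGetD s i ' ' then acc ++ ["Fermi"]
        else if PySem.List.pyGetD g i ' ' ∈ s then acc ++ ["Pico"]
        else acc) []
    = (g.zip s).flatMap (pvTok s) := by
  rw [PySem.List.pyRange_one]
  simp only [sub_zero, Int.toNat_natCast, List.foldl_map, zero_add, PySem.List.pyGetD_natCast]
  rw [pvFoldl_range_zip (fun acc a b =>
        if a = b then acc ++ ["Fermi"] else if a ∈ s then acc ++ ["Pico"] else acc) ' ' g s [] h]
  have hstep : (fun (acc : List String) (p : Char × Char) =>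
      if p.1 = p.2 then acc ++ ["Fermi"] else if p.1 ∈ s then acc ++ ["Pico"] else acc)
      = fun acc p => acc ++ pvTok s p := by
    funext acc p
    unfold pvTok
    split_ifs <;> simp
  rw [hstep, PySem.List.foldl_append_eq_flatMap]
  simp

-- ===== VERDICT (by name: the statement is the Claim_ definition above) =====
theorem get_clues_spec : Claim_equal_get_clues := by
  intro guess secret_num _ hpre
  unfold Spec_get_clues get_clues get_clues_alt
  simp only []
  set g := guess.toList with hg
  set s := secret_num.toList with hs
  by_cases heq : g = s
  · simp [heq]
  · simp only [heq, if_false]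
    rw [pvClues_eq g s hpre]
    rw [pvLen_tok s (g.zip s)]
    by_cases hz : (g.zip s).countP (fun p => p.1 == p.2)
        + (g.zip s).countP (fun p => !(p.1 == p.2) && decide (p.1 ∈ s)) = 0
    · simp [hz]
    · simp only [hz, if_false]
      rw [pvSorted_eq _ (pvMem_tok s (g.zip s))]
      rw [pvCount_fermi s (g.zip s), pvCount_pico s (g.zip s)]
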